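-- pv_equiv track=rewrite | github.com/dinkoslav/Python | Programing0-1/Week4/9-Winter-Is-Coming/winter.py | winter_is_coming
-- ===== SOURCE A (Python) =====
-- def winter_is_coming(seasons):
--     season_types = ["winter", "summer", "spring"]
--     season_count = 0
--     for season in seasons:
--         if season in season_types:
--             if season == season_types[0]:
--                 season_count = 0
--             else:
--                 season_count = season_count + 1
--     if season_count == 5:
--         return True
--     else:
--         return False
-- ===== SOURCE B (Python) =====
-- def winter_is_coming(seasons):
--     valid = [s for s in seasons if s in ("winter", "summer", "spring")]
--     count = 0
--     for s in reversed(valid):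
--         if s == "winter":
--             break
--         count += 1
--     return count == 5
-- ===== Notes on version B (the rewrite author's own statement) =====
-- stated objective: alternative
-- what changed: Replaces the forward reset-on-winter counter with filtering to valid seasons and a backward scan that counts the suffix after the last 'winter', breaking early at the first 'winter' found.
import Mathlib
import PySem

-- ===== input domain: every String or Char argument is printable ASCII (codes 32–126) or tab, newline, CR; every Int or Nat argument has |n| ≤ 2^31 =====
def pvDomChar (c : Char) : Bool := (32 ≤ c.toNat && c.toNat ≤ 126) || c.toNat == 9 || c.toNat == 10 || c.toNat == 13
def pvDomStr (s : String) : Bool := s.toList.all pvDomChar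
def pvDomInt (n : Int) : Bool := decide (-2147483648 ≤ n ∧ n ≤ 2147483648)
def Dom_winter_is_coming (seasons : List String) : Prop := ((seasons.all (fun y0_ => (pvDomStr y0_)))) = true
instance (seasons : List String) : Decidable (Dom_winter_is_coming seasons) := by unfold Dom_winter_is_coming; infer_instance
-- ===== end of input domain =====

-- B filters to the valid seasons and scans the filtered list from the END, counting until the
-- first 'winter'; A runs a forward reset-on-winter counter. Same value, different decomposition.

-- ===== PORT A =====
def winter_is_coming (seasons : List String) : Bool :=
  let season_types : List String := ["winter", "summer", "spring"]
  let season_count :=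
    seasons.foldl (fun season_count season =>
      if season ∈ season_types then
        if season = "winter" then 0 else season_count + 1
      else season_count) 0
  if season_count = 5 then true else false

-- ===== PORT B =====
-- the reversed loop with `break`: count leading non-'winter' elements, stop at the first 'winter'
def pvCountUntilWinter : List String → Nat
  | [] => 0
  | s :: rest => if s = "winter" then 0 else pvCountUntilWinter rest + 1

def winter_is_coming_alt (seasons : List String) : Bool :=
  let valid := seasons.filter (fun s => s ∈ ["winter", "summer", "spring"])
  pvCountUntilWinter valid.reverse == 5

-- ===== PRECONDITION & SPEC =====
def Spec_winter_is_coming (seasons : List String) (out : Bool) : Prop := out = winter_is_coming_alt seasons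
instance (seasons : List String) (out : Bool) : Decidable (Spec_winter_is_coming seasons out) := by unfold Spec_winter_is_coming; infer_instance

-- ===== CLAIM (what is proved, stated in full; the proofs are below) =====
def Claim_equal_winter_is_coming : Prop := ∀ (seasons : List String), Dom_winter_is_coming seasons → Spec_winter_is_coming seasons (winter_is_coming seasons)

-- ===== LEMMAS AND PROOFS =====

lemma pvCountUntilWinter_of_not_mem (l : List String) (h : "winter" ∉ l) :
    pvCountUntilWinter l = l.length := by
  induction l with
  | nil => rfl
  | cons s rest ih =>
    simp only [List.mem_cons, not_or] at h
    simp [pvCountUntilWinter, Ne.symm h.1, ih h.2]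

-- A's accumulator over any prefix equals the backward count of that prefix's filtered part
-- (offset by the incoming accumulator when no 'winter' has been seen yet).
lemma foldl_eq_countBack (xs : List String) (acc : Nat) :
    xs.foldl (fun season_count season =>
      if season ∈ (["winter", "summer", "spring"] : List String) then
        if season = "winter" then 0 else season_count + 1
      else season_count) acc =
    (if "winter" ∈ xs.filter (fun s => s ∈ (["winter", "summer", "spring"] : List String)) then
      pvCountUntilWinter (xs.filter (fun s => s ∈ (["winter", "summer", "spring"] : List String))).reverse
    else acc + (xs.filter (fun s => s ∈ (["winter", "summer", "spring"] : List String))).length) := by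
  induction xs using List.reverseRecOn with
  | nil => simp
  | append_singleton xs s ih =>
    rw [List.foldl_append, List.filter_append, ih]
    simp only [List.foldl_cons, List.foldl_nil]
    by_cases hv : s ∈ (["winter", "summer", "spring"] : List String)
    · have hfs : List.filter (fun s => decide (s ∈ (["winter", "summer", "spring"] : List String))) [s] = [s] := by
        rcases (by simpa using hv : s = "winter" ∨ s = "summer" ∨ s = "spring") with rfl | rfl | rfl <;> decide
      rw [if_pos hv, hfs]
      by_cases hw : s = "winter"
      · subst hw
        rw [if_pos rfl, if_pos (by simp)]
        rw [List.reverse_append, List.reverse_singleton, List.singleton_append]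
        rfl
      · have hws : ¬ "winter" = s := fun h => hw h.symm
        rw [if_neg hw]
        by_cases hmem : "winter" ∈ xs.filter (fun s => decide (s ∈ (["winter", "summer", "spring"] : List String)))
        · rw [if_pos hmem, if_pos (List.mem_append_left _ hmem),
            List.reverse_append, List.reverse_singleton, List.singleton_append]
          simp only [pvCountUntilWinter, if_neg hw]
        · have hnot : "winter" ∉ xs.filter (fun s => decide (s ∈ (["winter", "summer", "spring"] : List String))) ++ [s] := by
            intro h
            rcases List.mem_append.mp h with h | h
            · exact hmem h
            · exact hws (List.mem_singleton.mp h)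
          rw [if_neg hmem, if_neg hnot, List.length_append, List.length_singleton, Nat.add_assoc]
    · have hd : (decide (s ∈ (["winter", "summer", "spring"] : List String))) = false := by
        simpa using hv
      rw [if_neg hv, List.filter_singleton, hd]
      simp

lemma ite_eq_beq (a b : Nat) : (if a = b then true else false) = (a == b) := by
  by_cases h : a = b <;> simp [h]

-- ===== VERDICT (by name: the statement is the Claim_ definition above) =====
theorem winter_is_coming_spec : Claim_equal_winter_is_coming := by
  intro seasons _
  unfold Spec_winter_is_coming winter_is_coming winter_is_coming_alt
  simp only [foldl_eq_countBack]
  by_cases hmem : "winter" ∈ seasons.filter (fun s => s ∈ (["winter", "summer", "spring"] : List String))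
  · rw [if_pos hmem, ite_eq_beq]
  · rw [if_neg hmem, Nat.zero_add,
      pvCountUntilWinter_of_not_mem _ (by simpa using hmem), List.length_reverse, ite_eq_beq]
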